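-- pv_equiv track=rewrite | github.com/p69180/handygenome | src/handygenome/variant/repeat.py | decompose_repeat
-- ===== SOURCE A (Python) =====
-- import itertools
--
-- def decompose_repeat(seq):
--     if len(seq) == 1:
--         return [(seq, 1)]
--     else:
--         result = list()
--         seqlen = len(seq)
--         for sublen in itertools.chain(range(1, int(seqlen / 2) + 1), [seqlen]):
--             div, mod = divmod(seqlen, sublen)
--             if mod != 0:
--                 continue
--             subseq = seq[:sublen]
--             if subseq * div == seq:
--                 result.append((subseq, div))
--
--         return result
-- ===== SOURCE B (Python) =====
-- def decompose_repeat(seq):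
--     n = len(seq)
--     # smallest period p: least d >= 1 with seq[i] == seq[i - d] for all i in [d, n)
--     p = next(d for d in range(1, n + 1)
--              if all(seq[i] == seq[i - d] for i in range(d, n)))
--     result = [(seq[:d], n // d) for d in range(p, n, p) if n % d == 0]
--     result.append((seq, 1))
--     return result
-- ===== Notes on version B (the rewrite author's own statement) =====
-- stated objective: alternative
-- what changed: Instead of testing every candidate block length by building the repeated string and comparing, B finds the smallest period once by a pointwise character scan and then emits exactly the divisors of len(seq) that are multiples of that period (justified by the Fine-Wilf periodicity lemma), never constructing candidate strings that fail.
import Mathlib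
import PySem

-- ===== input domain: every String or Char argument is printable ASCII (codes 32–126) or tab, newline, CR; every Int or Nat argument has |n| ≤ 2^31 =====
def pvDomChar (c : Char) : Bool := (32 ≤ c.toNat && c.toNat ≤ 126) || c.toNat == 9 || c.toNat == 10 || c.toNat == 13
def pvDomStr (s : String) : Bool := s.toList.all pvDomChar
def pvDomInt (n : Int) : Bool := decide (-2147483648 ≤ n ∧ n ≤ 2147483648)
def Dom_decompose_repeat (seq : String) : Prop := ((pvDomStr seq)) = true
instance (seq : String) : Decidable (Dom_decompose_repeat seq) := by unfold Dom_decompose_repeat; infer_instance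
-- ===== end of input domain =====

-- B finds the smallest period of seq once by a pointwise scan and emits only the divisor
-- lengths that are multiples of it (alternative algorithm; equivalence rests on Fine–Wilf).

-- ===== PORT A =====
def decompose_repeat (seq : String) : List (String × Int) :=
  let l := seq.toList
  if l.length == 1 then [(seq, 1)]
  else
    let seqlen : Int := (l.length : Int)
    -- int(seqlen / 2) equals seqlen // 2 exactly, since seqlen ≥ 0
    (PySem.List.pyRange 1 (PySem.Int.floordiv seqlen 2 + 1) 1 ++ [seqlen]).foldl
      (fun result sublen =>
        match PySem.Int.divmod? seqlen sublen with
        | none => result        -- divmod raises only for sublen = 0, i.e. seq = "" (outside Pre_)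
        | some (div, md) =>
          if md ≠ 0 then result
          else
            let subseq := PySem.Str.slice seq none (some sublen)
            -- subseq * div == seq, ported by hand: div ≥ 0 here, so it is div concatenated copies
            if (List.replicate div.toNat subseq.toList).flatten == l then
              result ++ [(subseq, div)]
            else result) []

-- ===== PORT B =====
def decompose_repeat_alt (seq : String) : List (String × Int) :=
  let l := seq.toList
  let n : Int := (l.length : Int)
  match (PySem.List.pyRange 1 (n + 1) 1).find? (fun d =>
      (PySem.List.pyRange d n 1).all fun i =>
        PySem.List.pyGet? l i == PySem.List.pyGet? l (i - d)) with
  | none => []    -- Python: next(...) raises StopIteration, only for seq = "" (outside Pre_)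
  | some p =>
    (PySem.List.pyRange p n p).foldl
      (fun result d =>
        if PySem.Int.mod n d == 0 then
          result ++ [(PySem.Str.slice seq none (some d), PySem.Int.floordiv n d)]
        else result) []
    ++ [(seq, 1)]

-- ===== PRECONDITION & SPEC =====
-- Pre_ excludes only the empty string, on which Python A raises ZeroDivisionError (and B StopIteration).
def Pre_decompose_repeat (seq : String) : Prop := seq ≠ ""
instance (seq : String) : Decidable (Pre_decompose_repeat seq) := by unfold Pre_decompose_repeat; infer_instance
def pvWitness_decompose_repeat : String := "abab"

def Spec_decompose_repeat (seq : String) (out : List (String × Int)) : Prop := out = decompose_repeat_alt seq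
instance (seq : String) (out : List (String × Int)) : Decidable (Spec_decompose_repeat seq out) := by unfold Spec_decompose_repeat; infer_instance

-- ===== CLAIM (what is proved, stated in full; the proofs are below) =====
def Claim_equal_decompose_repeat : Prop := ∀ (seq : String), Dom_decompose_repeat seq → Pre_decompose_repeat seq → Spec_decompose_repeat seq (decompose_repeat seq)

-- ===== LEMMAS AND PROOFS =====

-- l has period d: positions d apart agree
def pvPer (l : List Char) (d : ℕ) : Prop := ∀ i : ℕ, i + d < l.length → l[i]? = l[i + d]?

theorem pvPer_len (l : List Char) : pvPer l l.length := by
  intro i h; omega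

theorem pvPer_mul (l : List Char) (p : ℕ) (h : pvPer l p) (m : ℕ) : pvPer l (p * m) := by
  induction m with
  | zero => intro i hi; simp
  | succ m ih =>
    intro i hi
    have he : p * (m + 1) = p * m + p := by ring
    have h1 : l[i]? = l[i + p]? := h i (by omega)
    have h2 : l[i + p]? = l[i + p + p * m]? := ih (i + p) (by omega)
    rw [h1, h2]; congr 1; ring

theorem pvPer_dvd (l : List Char) (p d : ℕ) (h : pvPer l p) (hdvd : p ∣ d) : pvPer l d := by
  obtain ⟨m, rfl⟩ := hdvd; exact pvPer_mul l p h m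

theorem pvPer_sub (l : List Char) (p q : ℕ) (hlt : p < q) (hn : p + q ≤ l.length)
    (hp : pvPer l p) (hq : pvPer l q) : pvPer l (q - p) := by
  intro i hi
  by_cases hc : i + q < l.length
  · have h1 : l[i]? = l[i + q]? := hq i hc
    have h2 : l[i + q - p]? = l[i + q - p + p]? := hp (i + q - p) (by omega)
    have e : i + q - p + p = i + q := by omega
    rw [e] at h2
    have e2 : i + (q - p) = i + q - p := by omega
    rw [e2, h1, h2]
  · have hip : p ≤ i := by omega
    have h1 : l[i - p]? = l[i - p + p]? := hp (i - p) (by omega)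
    have h2 : l[i - p]? = l[i - p + q]? := hq (i - p) (by omega)
    have e1 : i - p + p = i := by omega
    have e2 : i - p + q = i + (q - p) := by omega
    rw [e1] at h1; rw [e2] at h2
    rw [← h1, h2]

theorem pvFW (l : List Char) : ∀ m p q : ℕ, p + q ≤ m → 0 < p → 0 < q → p + q ≤ l.length →
    pvPer l p → pvPer l q → pvPer l (p.gcd q) := by
  intro m
  induction m with
  | zero => intro p q hm hp hq _ _ _; omega
  | succ m ih =>
    intro p q hm hp hq hn hPp hPq
    rcases lt_trichotomy p q with h | h | h
    · have hsub : pvPer l (q - p) := pvPer_sub l p q h hn hPp hPq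
      have := ih p (q - p) (by omega) hp (by omega) (by omega) hPp hsub
      rwa [Nat.gcd_sub_self_right (by omega)] at this
    · subst h; rwa [Nat.gcd_self]
    · have hsub : pvPer l (p - q) := pvPer_sub l q p h (by omega) hPq hPp
      have := ih q (p - q) (by omega) hq (by omega) (by omega) hPq hsub
      rwa [Nat.gcd_sub_self_right (by omega), Nat.gcd_comm] at this

theorem pvFlatRep_getElem? (t : List Char) : ∀ (k i : ℕ), i < k * t.length →
    (List.flatten (List.replicate k t))[i]? = t[i % t.length]? := by
  intro k
  induction k with
  | zero => intro i hi; omega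
  | succ k ih =>
    intro i hi
    have ht : 0 < t.length := Nat.pos_of_ne_zero (by rintro h0; rw [h0, Nat.mul_zero] at hi; omega)
    rw [List.replicate_succ, List.flatten_cons, List.getElem?_append]
    by_cases h : i < t.length
    · rw [if_pos h, Nat.mod_eq_of_lt h]
    · rw [Nat.succ_mul] at hi
      rw [if_neg h, ih (i - t.length) (by omega)]
      congr 1
      exact (Nat.mod_eq_sub_mod (not_lt.mp h)).symm

theorem pvPer_mod (l : List Char) (d : ℕ) (h : pvPer l d) (hd : 0 < d) :
    ∀ i, i < l.length → l[i]? = l[i % d]? := by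
  intro i
  induction i using Nat.strong_induction_on with
  | _ i ih =>
    intro hi
    by_cases hc : i < d
    · rw [Nat.mod_eq_of_lt hc]
    · have h1 : l[i - d]? = l[i - d + d]? := h (i - d) (by omega)
      have e : i - d + d = i := by omega
      rw [e] at h1
      rw [← h1, ih (i - d) (by omega) (by omega)]
      congr 1
      rw [← Nat.mod_eq_sub_mod (by omega)]

theorem pvRep_iff (l : List Char) (d : ℕ) (hd : 0 < d) (hle : d ≤ l.length)
    (hdvd : d ∣ l.length) :
    ((List.replicate (l.length / d) (l.take d)).flatten = l ↔ pvPer l d) := by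
  have htl : (l.take d).length = d := by simp [hle]
  have hmul : l.length / d * d = l.length := Nat.div_mul_cancel hdvd
  constructor
  · intro h i hi
    have e1 : l[i]? = (l.take d)[i % d]? := by
      conv_lhs => rw [← h]
      rw [pvFlatRep_getElem? _ _ i (by rw [htl, hmul]; omega), htl]
    have e2 : l[i + d]? = (l.take d)[(i + d) % d]? := by
      conv_lhs => rw [← h]
      rw [pvFlatRep_getElem? _ _ (i + d) (by rw [htl, hmul]; omega), htl]
    rw [e1, e2, Nat.add_mod_right]
  · intro hper
    apply List.ext_getElem?
    intro i
    by_cases hi : i < l.length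
    · rw [pvFlatRep_getElem? _ _ i (by rw [htl, hmul]; exact hi), htl]
      rw [List.getElem?_take, if_pos (Nat.mod_lt i hd)]
      exact (pvPer_mod l d hper hd i hi).symm
    · have hlen : (List.replicate (l.length / d) (l.take d)).flatten.length ≤ i := by
        simp only [List.length_flatten, List.map_replicate, List.sum_replicate, smul_eq_mul, htl]
        omega
      rw [List.getElem?_eq_none hlen, List.getElem?_eq_none (by omega)]


theorem pvFind?_least (P : ℕ → Bool) : ∀ (m a p : ℕ), a ≤ p → p < a + m → P p = true →
    (∀ q, a ≤ q → q < p → P q = false) → (List.range' a m).find? P = some p := by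
  intro m
  induction m with
  | zero => intro a p h1 h2; omega
  | succ m ih =>
    intro a p h1 h2 h3 h4
    rw [List.range'_succ, List.find?_cons]
    rcases Nat.eq_or_lt_of_le h1 with h | h
    · subst h; rw [h3]
    · rw [h4 a le_rfl h]
      exact ih (a + 1) p h (by omega) h3 (fun q hq1 hq2 => h4 q (by omega) hq2)

theorem pvMultiples (p : ℕ) : ∀ m : ℕ,
    (List.range' 1 m).filter (fun d => decide (p ∣ d)) = (List.range (m / p)).map (fun k => p + p * k) := by
  intro m
  induction m with
  | zero => simp
  | succ m ih =>
    rw [List.range'_1_concat, List.filter_append, ih]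
    by_cases h : p ∣ (m + 1)
    · have : (m + 1) / p = m / p + 1 := by rw [Nat.succ_div, if_pos h]
      have h1 : p * (m / p + 1) = m + 1 := by rw [← this]; exact Nat.mul_div_cancel' h
      have h3 : p + p * (m / p) = m + 1 := by rw [Nat.mul_succ] at h1; omega
      have h' : p ∣ 1 + m := by rwa [Nat.add_comm]
      rw [this, List.range_succ, List.map_append]
      simp only [List.filter_cons, List.filter_nil, decide_eq_true_eq,
        List.map_cons, List.map_nil, h3, Nat.add_comm 1 m]
      rw [if_pos h]
    · have : (m + 1) / p = m / p := by rw [Nat.succ_div, if_neg h]; omega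
      have h' : ¬ p ∣ 1 + m := by rwa [Nat.add_comm]
      rw [this]
      simp [h']

theorem pvDivisorHalf (d n : ℕ) (hn : 0 < n) (hdvd : d ∣ n) (hlt : d < n) : 2 * d ≤ n := by
  obtain ⟨m, rfl⟩ := hdvd
  have hm : 2 ≤ m := by by_contra h; interval_cases m <;> omega
  have := Nat.mul_le_mul_left d hm
  omega

theorem pvPer_bdd_iff (l : List Char) (d : ℕ) :
    (0 < d ∧ ∀ i < l.length, i + d < l.length → l[i]? = l[i + d]?) ↔ (0 < d ∧ pvPer l d) := by
  constructor
  · rintro ⟨h1, h2⟩; exact ⟨h1, fun i hi => h2 i (by omega) hi⟩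
  · rintro ⟨h1, h2⟩; exact ⟨h1, fun i _ hi => h2 i hi⟩

theorem pvSliceTake (s : String) (d : ℕ) :
    (PySem.Str.slice s none (some (d : ℤ))).toList = s.toList.take d := by
  rw [PySem.Str.toList_slice, PySem.Chars.slice_eq_listSlice,
    PySem.List.slice_to _ (by positivity), Int.toNat_natCast]

theorem pvSliceFull (s : String) :
    PySem.Str.slice s none (some ((s.toList.length : ℕ) : ℤ)) = s := by
  apply String.toList_inj.mp
  rw [pvSliceTake, List.take_length]

theorem pvDvdBool (n d : ℕ) : ((PySem.Int.mod (n : ℤ) (d : ℤ)) == (0 : ℤ)) = decide (d ∣ n) := by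
  rw [PySem.Int.mod_natCast, Bool.eq_iff_iff]
  simp only [beq_iff_eq, Nat.cast_eq_zero, decide_eq_true_eq]
  exact (Nat.dvd_iff_mod_eq_zero).symm

theorem pvPyRangeOne (m : ℕ) :
    PySem.List.pyRange 1 ((m : ℤ) + 1) 1 = (List.range' 1 m).map (fun d : ℕ => (d : ℤ)) := by
  rw [PySem.List.pyRange_of_pos _ _ one_pos]
  by_cases h : (1 : ℤ) < (m : ℤ) + 1
  · rw [if_pos h]
    have e : (((m : ℤ) + 1 - 1 + 1 - 1) / 1).toNat = m := by omega
    rw [e, List.range'_eq_map_range, List.map_map]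
    apply List.map_congr_left
    intro k _
    simp only [Function.comp]
    push_cast
    ring
  · have hm : m = 0 := by omega
    subst hm
    rw [if_neg h]
    simp

theorem pvPyRangeStep (p n : ℕ) (hp : 0 < p) (hple : p ≤ n) (hn : 0 < n) :
    PySem.List.pyRange (p : ℤ) (n : ℤ) (p : ℤ) =
      (List.range ((n - 1) / p)).map (fun k : ℕ => ((p + p * k : ℕ) : ℤ)) := by
  rw [PySem.List.pyRange_of_pos _ _ (by exact_mod_cast hp)]
  by_cases h : (p : ℤ) < (n : ℤ)
  · rw [if_pos h]
    have e1 : ((n : ℤ) - p + p - 1) = ((n - 1 : ℕ) : ℤ) := by omega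
    have e2 : ((((n - 1 : ℕ) : ℤ)) / (p : ℤ)).toNat = (n - 1) / p := by
      rw [Int.ofNat_ediv_ofNat, Int.toNat_natCast]
    rw [e1, e2]
    apply List.map_congr_left
    intro k _
    push_cast
    ring
  · rw [if_neg h]
    have hpn : p = n := by omega
    subst hpn
    rw [Nat.div_eq_of_lt (by omega)]
    simp

theorem pvChk_iff (l : List Char) (d : ℕ) :
    (((PySem.List.pyRange (d : ℤ) (l.length : ℤ) 1).all fun i =>
        PySem.List.pyGet? l i == PySem.List.pyGet? l (i - (d : ℤ))) = true) ↔ pvPer l d := by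
  rw [List.all_eq_true]
  constructor
  · intro h i hi
    have hm : ((i + d : ℕ) : ℤ) ∈ PySem.List.pyRange (d : ℤ) (l.length : ℤ) 1 := by
      rw [PySem.List.mem_pyRange_iff_of_pos one_pos]
      exact ⟨by push_cast; omega, by push_cast; omega, one_dvd _⟩
    have hb := h _ hm
    rw [beq_iff_eq] at hb
    have e : ((i + d : ℕ) : ℤ) - (d : ℤ) = ((i : ℕ) : ℤ) := by push_cast; ring
    rw [e, PySem.List.pyGet?_natCast, PySem.List.pyGet?_natCast] at hb
    exact hb.symm
  · intro h x hx
    rw [PySem.List.mem_pyRange_iff_of_pos one_pos] at hx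
    obtain ⟨hx1, hx2, -⟩ := hx
    lift x to ℕ using le_trans (Int.natCast_nonneg d) hx1
    have hdx : d ≤ x := by exact_mod_cast hx1
    have hxn : x < l.length := by exact_mod_cast hx2
    rw [beq_iff_eq]
    have e : (x : ℤ) - (d : ℤ) = ((x - d : ℕ) : ℤ) := by
      rw [Int.ofNat_sub hdx]
    rw [e, PySem.List.pyGet?_natCast, PySem.List.pyGet?_natCast]
    have hh := h (x - d) (by omega)
    rw [show x - d + d = x from by omega] at hh
    exact hh.symm

theorem pvMultiples' (p n : ℕ) (q : ℕ → Bool) :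
    ((List.range ((n - 1) / p)).filter (fun k => q (p + p * k))).map (fun k : ℕ => p + p * k)
      = (List.range' 1 (n - 1)).filter (fun d => q d && decide (p ∣ d)) := by
  have h1 := pvMultiples p (n - 1)
  calc ((List.range ((n - 1) / p)).filter (fun k => q (p + p * k))).map (fun k : ℕ => p + p * k)
      = ((List.range ((n - 1) / p)).filter (q ∘ (fun k : ℕ => p + p * k))).map
          (fun k : ℕ => p + p * k) := rfl
    _ = List.filter q ((List.range ((n - 1) / p)).map (fun k : ℕ => p + p * k)) :=
        (List.filter_map).symm
    _ = List.filter q (List.filter (fun d => decide (p ∣ d)) (List.range' 1 (n - 1))) := by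
        rw [← h1]
    _ = (List.range' 1 (n - 1)).filter (fun d => q d && decide (p ∣ d)) := List.filter_filter

theorem pvFind_period (l : List Char) (p : ℕ) (hp0 : 0 < p) (hpper : pvPer l p)
    (hmin : ∀ q, 0 < q → q < p → ¬ pvPer l q) (hple : p ≤ l.length) :
    (PySem.List.pyRange 1 ((l.length : ℤ) + 1) 1).find? (fun d =>
        (PySem.List.pyRange d (l.length : ℤ) 1).all fun i =>
          PySem.List.pyGet? l i == PySem.List.pyGet? l (i - d)) = some (p : ℤ) := by
  rw [pvPyRangeOne, List.find?_map]
  rw [pvFind?_least _ l.length 1 p hp0 (by omega) ?_ ?_]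
  · rfl
  · show ((PySem.List.pyRange ((p : ℕ) : ℤ) (l.length : ℤ) 1).all _) = true
    exact (pvChk_iff l p).mpr hpper
  · intro q h1 h2
    apply Bool.eq_false_iff.mpr
    intro hc
    exact hmin q h1 h2 ((pvChk_iff l q).mp hc)

theorem pvB_canon (seq : String) (p : ℕ) (hp0 : 0 < p) (hple : p ≤ seq.toList.length)
    (hn : 0 < seq.toList.length)
    (hfind : (PySem.List.pyRange 1 ((seq.toList.length : ℤ) + 1) 1).find? (fun d =>
        (PySem.List.pyRange d (seq.toList.length : ℤ) 1).all fun i =>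
          PySem.List.pyGet? seq.toList i == PySem.List.pyGet? seq.toList (i - d)) = some (p : ℤ)) :
    decompose_repeat_alt seq =
      ((((List.range' 1 (seq.toList.length - 1)).filter
          (fun d => decide (d ∣ seq.toList.length) && decide (p ∣ d))).map
          (fun d : ℕ => (d : ℤ))).map
          (fun x : ℤ => (PySem.Str.slice seq none (some x),
            PySem.Int.floordiv ((seq.toList.length : ℕ) : ℤ) x))) ++ [(seq, 1)] := by
  simp only [decompose_repeat_alt, hfind]
  rw [PySem.List.foldl_append_if, pvPyRangeStep p _ hp0 hple hn, List.filter_map]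
  rw [List.filter_congr (q := fun k : ℕ => decide ((p + p * k) ∣ seq.toList.length))
      (by intro k _; exact pvDvdBool seq.toList.length (p + p * k))]
  rw [show (fun k : ℕ => ((p + p * k : ℕ) : ℤ)) =
        ((fun d : ℕ => (d : ℤ)) ∘ (fun k : ℕ => p + p * k)) from rfl, ← List.map_map]
  rw [pvMultiples' p seq.toList.length (fun d => decide (d ∣ seq.toList.length))]
  simp

theorem pvA_canon (seq : String) (p : ℕ) (hn2 : 2 ≤ seq.toList.length)
    (hp0 : 0 < p) (hpper : pvPer seq.toList p)
    (hmin : ∀ q, 0 < q → q < p → ¬ pvPer seq.toList q) :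
    decompose_repeat seq =
      ((((List.range' 1 (seq.toList.length - 1)).filter
          (fun d => decide (d ∣ seq.toList.length) && decide (p ∣ d))).map
          (fun d : ℕ => (d : ℤ))).map
          (fun x : ℤ => (PySem.Str.slice seq none (some x),
            PySem.Int.floordiv ((seq.toList.length : ℕ) : ℤ) x))) ++ [(seq, 1)] := by
  have hn : 0 < seq.toList.length := by omega
  simp only [decompose_repeat]
  rw [if_neg (by simp only [beq_iff_eq]; omega)]
  rw [show PySem.Int.floordiv ((seq.toList.length : ℕ) : ℤ) 2 = ((seq.toList.length / 2 : ℕ) : ℤ)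
      from by rw [PySem.Int.floordiv_eq_ediv_of_pos (by norm_num)]; omega]
  rw [pvPyRangeOne]
  have hcong : ∀ (acc : List (String × ℤ)),
      ∀ x ∈ (List.range' 1 (seq.toList.length / 2)).map (fun d : ℕ => (d : ℤ)) ++
        [((seq.toList.length : ℕ) : ℤ)],
      (fun result sublen =>
        match PySem.Int.divmod? ((seq.toList.length : ℕ) : ℤ) sublen with
        | none => result
        | some (div, md) =>
          if md ≠ 0 then result
          else
            if (List.replicate div.toNat
                (PySem.Str.slice seq none (some sublen)).toList).flatten == seq.toList then
              result ++ [(PySem.Str.slice seq none (some sublen), div)]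
            else result) acc x
      = (fun acc x =>
          if ((PySem.Int.mod ((seq.toList.length : ℕ) : ℤ) x == 0) &&
              ((List.replicate (PySem.Int.floordiv ((seq.toList.length : ℕ) : ℤ) x).toNat
                (PySem.Str.slice seq none (some x)).toList).flatten == seq.toList)) then
            acc ++ [(PySem.Str.slice seq none (some x),
              PySem.Int.floordiv ((seq.toList.length : ℕ) : ℤ) x)]
          else acc) acc x := by
    intro acc x hx
    have hx1 : ∃ d : ℕ, 1 ≤ d ∧ x = (d : ℤ) := by
      rcases List.mem_append.mp hx with h | h
      · obtain ⟨d, hd, rfl⟩ := List.mem_map.mp h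
        exact ⟨d, (List.mem_range'_1.mp hd).1, rfl⟩
      · simp only [List.mem_singleton] at h
        exact ⟨seq.toList.length, by omega, h⟩
    obtain ⟨d, hd1, rfl⟩ := hx1
    have hdz : ¬ (((d : ℕ) : ℤ) = 0) := by exact_mod_cast Nat.pos_iff_ne_zero.mp hd1
    simp only [PySem.Int.divmod?, if_neg hdz]
    simp [PySem.Int.mod, PySem.Int.floordiv]
    split_ifs <;> first | rfl | tauto
  rw [PySem.List.foldl_congr_mem _ _ _ [] hcong]
  rw [PySem.List.foldl_append_if, List.filter_append]
  have htailc : ((PySem.Int.mod ((seq.toList.length : ℕ) : ℤ) ((seq.toList.length : ℕ) : ℤ) == 0) &&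
      ((List.replicate (PySem.Int.floordiv ((seq.toList.length : ℕ) : ℤ)
          ((seq.toList.length : ℕ) : ℤ)).toNat
        (PySem.Str.slice seq none (some ((seq.toList.length : ℕ) : ℤ))).toList).flatten ==
        seq.toList)) = true := by
    rw [PySem.Int.mod_natCast, PySem.Int.floordiv_natCast, Nat.mod_self, Nat.div_self hn]
    simp
  have hfront : ∀ pA : ℤ → Bool, (∀ d ∈ List.range' 1 (seq.toList.length / 2),
        pA ((d : ℕ) : ℤ) = (decide (d ∣ seq.toList.length) && decide (p ∣ d))) →
      List.filter pA ((List.range' 1 (seq.toList.length / 2)).map (fun d : ℕ => (d : ℤ)))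
      = ((List.range' 1 (seq.toList.length - 1)).filter
          (fun d => decide (d ∣ seq.toList.length) && decide (p ∣ d))).map
          (fun d : ℕ => (d : ℤ)) := by
    intro pA hpA
    rw [List.filter_map]
    rw [List.filter_congr (p := pA ∘ fun d : ℕ => (d : ℤ))
        (q := fun d : ℕ => decide (d ∣ seq.toList.length) && decide (p ∣ d))
        (fun d hd => hpA d hd)]
    have hsplit : List.range' 1 (seq.toList.length - 1)
        = List.range' 1 (seq.toList.length / 2) ++
          List.range' (1 + seq.toList.length / 2)
            (seq.toList.length - 1 - seq.toList.length / 2) := by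
      rw [List.range'_append_1]
      congr 1
      omega
    rw [hsplit, List.filter_append]
    have hnil : List.filter (fun d => decide (d ∣ seq.toList.length) && decide (p ∣ d))
        (List.range' (1 + seq.toList.length / 2)
          (seq.toList.length - 1 - seq.toList.length / 2)) = [] := by
      rw [List.filter_eq_nil_iff]
      intro a ha hc
      obtain ⟨ha1, ha2⟩ := List.mem_range'_1.mp ha
      simp only [Bool.and_eq_true, decide_eq_true_eq] at hc
      have h2a : 2 * a ≤ seq.toList.length :=
        pvDivisorHalf a seq.toList.length hn hc.1 (by omega)
      omega
    rw [hnil, List.append_nil]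
  rw [hfront _ ?_]
  · simp only [List.filter_cons, List.filter_nil, htailc, if_pos, List.map_append, List.map_cons,
      List.map_nil, List.nil_append]
    congr 1
    rw [pvSliceFull, PySem.Int.floordiv_natCast, Nat.div_self hn]
    rfl
  · intro d hd
    obtain ⟨hd1, hd2⟩ := List.mem_range'_1.mp hd
    have hdn : d ≤ seq.toList.length := by omega
    rw [PySem.Int.mod_natCast, PySem.Int.floordiv_natCast, Int.toNat_natCast, pvSliceTake,
      Bool.eq_iff_iff]
    simp only [Bool.and_eq_true, beq_iff_eq, Nat.cast_eq_zero, decide_eq_true_eq]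
    constructor
    · rintro ⟨hm, hf⟩
      have hdvd : d ∣ seq.toList.length := Nat.dvd_of_mod_eq_zero hm
      have hper : pvPer seq.toList d :=
        (pvRep_iff seq.toList d (by omega) hdn hdvd).mp hf
      have hdlt : d < seq.toList.length := by omega
      have h2d : 2 * d ≤ seq.toList.length := pvDivisorHalf d seq.toList.length hn hdvd hdlt
      have hpd : p ≤ d := by
        by_contra hcon
        exact hmin d (by omega) (by omega) hper
      have hfw : pvPer seq.toList (p.gcd d) :=
        pvFW seq.toList (p + d) p d le_rfl hp0 (by omega) (by omega) hpper hper
      have hgle : p.gcd d ≤ p := Nat.gcd_le_left d hp0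
      have hgpos : 0 < p.gcd d := Nat.gcd_pos_of_pos_left d hp0
      have hg : p.gcd d = p := by
        by_contra hcon
        exact hmin (p.gcd d) hgpos (by omega) hfw
      exact ⟨hdvd, hg ▸ Nat.gcd_dvd_right p d⟩
    · rintro ⟨hdvd, hpd⟩
      refine ⟨Nat.dvd_iff_mod_eq_zero.mp hdvd, ?_⟩
      exact (pvRep_iff seq.toList d (by omega) hdn hdvd).mpr
        (pvPer_dvd seq.toList p d hpper hpd)

-- ===== VERDICT (by name: the statement is the Claim_ definition above) =====
theorem decompose_repeat_spec : Claim_equal_decompose_repeat := by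
  intro seq _ hpre
  unfold Spec_decompose_repeat
  have hln : seq.toList ≠ [] := by
    intro h
    exact hpre (String.toList_inj.mp (by rw [h]; rfl))
  have hn : 0 < seq.toList.length := List.length_pos_iff.mpr hln
  have dec : DecidablePred (fun d => 0 < d ∧ pvPer seq.toList d) := fun d =>
    decidable_of_iff _ (pvPer_bdd_iff seq.toList d)
  haveI := dec
  have hex : ∃ d, 0 < d ∧ pvPer seq.toList d := ⟨seq.toList.length, hn, pvPer_len seq.toList⟩
  obtain ⟨hp0, hpper⟩ := Nat.find_spec hex
  have hple : Nat.find hex ≤ seq.toList.length := Nat.find_le ⟨hn, pvPer_len seq.toList⟩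
  have hmin : ∀ q, 0 < q → q < Nat.find hex → ¬ pvPer seq.toList q := fun q h1 h2 hq =>
    Nat.find_min hex h2 ⟨h1, hq⟩
  have hB := pvB_canon seq (Nat.find hex) hp0 hple hn
    (pvFind_period seq.toList (Nat.find hex) hp0 hpper hmin hple)
  by_cases hone : seq.toList.length = 1
  · rw [hB]
    simp only [decompose_repeat]
    rw [if_pos (by simp only [beq_iff_eq]; omega), hone]
    simp
  · rw [hB, pvA_canon seq (Nat.find hex) (by omega) hp0 hpper hmin]
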